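-- pv_equiv track=rewrite | github.com/kotaoue/pomoslack | modules/clitable/clitable.py | len_title
-- ===== SOURCE A (Python) =====
-- def len_title(content_list):
--     len_dict = {}
--
--     for detail_dict in content_list:
--         for key, value in detail_dict.items():
--             item_length = max(len(str(key)), len(str(value)))
--             if item_length > len_dict.get(key, 0):
--                 len_dict[key] = item_length
--
--     return len_dict
-- ===== SOURCE B (Python) =====
-- def len_title(content_list):
--     # Phase 1: group the value lengths by column key.
--     lengths = {}
--     for detail_dict in content_list:
--         for key, value in detail_dict.items():
--             lengths.setdefault(key, []).append(len(str(value)))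
--     # Phase 2: reduce each group, always including the key's own length.
--     return {key: max(len(str(key)), max(value_lengths))
--             for key, value_lengths in lengths.items()}
-- ===== Notes on version B (the rewrite author's own statement) =====
-- stated objective: alternative
-- what changed: Replaces A's single interleaved running-max update on a result dict by a group-then-reduce: one pass builds a dict-of-lists of value lengths per key, a second pass maps each group to max(len(key), max(lengths)).
-- outside the precondition, e.g. on len_title([{'': ''}]): A returns {}, B returns {'': 0}; on len_title([{'': ''}, {'a': 'x'}, {'': 'bb'}]): A returns {'a': 1, '': 2}, B returns {'': 2, 'a': 1}
import Mathlib
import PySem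

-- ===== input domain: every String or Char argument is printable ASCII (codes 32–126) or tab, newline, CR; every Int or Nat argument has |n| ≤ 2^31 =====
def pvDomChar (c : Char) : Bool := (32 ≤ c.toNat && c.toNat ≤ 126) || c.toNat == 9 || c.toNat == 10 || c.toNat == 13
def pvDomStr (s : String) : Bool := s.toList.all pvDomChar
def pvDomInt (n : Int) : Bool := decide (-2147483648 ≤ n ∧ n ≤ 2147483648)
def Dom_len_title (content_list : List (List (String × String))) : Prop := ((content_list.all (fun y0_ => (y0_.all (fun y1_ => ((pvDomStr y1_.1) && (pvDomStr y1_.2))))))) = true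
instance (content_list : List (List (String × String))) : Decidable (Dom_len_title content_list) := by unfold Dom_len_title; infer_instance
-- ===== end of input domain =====

-- B replaces A's interleaved running-max on the result dict by a two-phase group-then-reduce
-- (dict-of-lists of value lengths, then a per-key max); alternative decomposition, same cost.


-- ===== PORT A =====
def len_title (content_list : List (List (String × String))) : List (String × Int) :=
  (content_list.foldl
    (fun len_dict detail_dict =>
      detail_dict.foldl
        (fun len_dict kv =>
          let item_length := max (PySem.Str.len kv.1) (PySem.Str.len kv.2)
          if item_length > len_dict.getD kv.1 0 then len_dict.insert kv.1 item_length
          else len_dict)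
        len_dict)
    (PySem.Dict.empty : PySem.Dict String Int)).items

-- ===== PORT B =====
-- max(value_lengths) on a (always nonempty) list, as Python computes it
def pyMaxInt : List Int → Int
  | [] => 0
  | h :: t => t.foldl max h

def len_title_alt (content_list : List (List (String × String))) : List (String × Int) :=
  ((content_list.foldl
      (fun lengths detail_dict =>
        detail_dict.foldl
          (fun lengths kv => lengths.modify kv.1 [] (· ++ [PySem.Str.len kv.2]))
          lengths)
      (PySem.Dict.empty : PySem.Dict String (List Int))).items).map
    (fun p => (p.1, max (PySem.Str.len p.1) (pyMaxInt p.2)))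

-- ===== PRECONDITION & SPEC =====
-- Pre_ excludes inputs whose first pair with the empty-string key also has an empty-string value:
-- there A's `> 0` update guard skips that zero-width pair, so the empty-key column is omitted (or
-- inserted only at a later nonempty occurrence, at a later position), an accidental corner of A's
-- guard, while B (group-then-reduce) keys every column at its first occurrence; both behaviours
-- are defensible for an unspecified zero-width column.
def Pre_len_title (content_list : List (List (String × String))) : Prop :=
  ((content_list.flatten.filter (fun q => q.1 == "")).head?.all (fun p => p.2 != "")) = true
instance (content_list : List (List (String × String))) : Decidable (Pre_len_title content_list) := by
  unfold Pre_len_title; infer_instance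

def pvWitness_len_title : (List (List (String × String))) := [[("a", "xy")], [("", "7")]]

def Spec_len_title (content_list : List (List (String × String))) (out : List (String × Int)) : Prop := out = len_title_alt content_list
instance (content_list : List (List (String × String))) (out : List (String × Int)) : Decidable (Spec_len_title content_list out) := by unfold Spec_len_title; infer_instance

-- ===== CLAIM (what is proved, stated in full; the proofs are below) =====
def Claim_equal_len_title : Prop := ∀ (content_list : List (List (String × String))), Dom_len_title content_list → Pre_len_title content_list → Spec_len_title content_list (len_title content_list)

-- ===== LEMMAS AND PROOFS =====

-- the reduce phase of B, applied to one group entry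
def pvT (p : String × List Int) : String × Int := (p.1, max (PySem.Str.len p.1) (pyMaxInt p.2))

-- A's loop body / B's grouping loop body, over the flattened pair list
def pvStepA (d : PySem.Dict String Int) (kv : String × String) : PySem.Dict String Int :=
  let item_length := max (PySem.Str.len kv.1) (PySem.Str.len kv.2)
  if item_length > d.getD kv.1 0 then d.insert kv.1 item_length else d

def pvStepB (x : PySem.Dict String (List Int)) (kv : String × String) : PySem.Dict String (List Int) :=
  x.modify kv.1 [] (· ++ [PySem.Str.len kv.2])

-- "the first remaining pair with key '' (if any) has a nonempty value"
def pvHeadOk (rest : List (String × String)) : Prop :=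
  ((rest.filter (fun q => q.1 == "")).head?.all (fun p => p.2 != "")) = true

theorem pyMaxInt_append_singleton (ls : List Int) (a : Int) (h : ls ≠ []) :
    pyMaxInt (ls ++ [a]) = max (pyMaxInt ls) a := by
  cases ls with
  | nil => exact absurd rfl h
  | cons x t => simp [pyMaxInt, List.foldl_append]

theorem pvStrLen_pos (s : String) (h : s ≠ "") : 0 < PySem.Str.len s := by
  have hl : s.toList ≠ [] := fun hc => h (String.toList_eq_nil_iff.mp hc)
  rw [PySem.Str.len_eq]
  have : 0 < s.toList.length := List.length_pos_iff.mpr hl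
  exact_mod_cast this

theorem pv_loop_eq (rest : List (String × String)) (x : PySem.Dict String (List Int))
    (d : PySem.Dict String Int)
    (hitems : d.items = x.items.map pvT)
    (hnd : x.keys.Nodup)
    (hne : ∀ p ∈ x.items, p.2 ≠ ([] : List Int))
    (hok : ("" ∈ x.keys) ∨ pvHeadOk rest) :
    (rest.foldl pvStepA d).items = (rest.foldl pvStepB x).items.map pvT := by
  induction rest generalizing x d with
  | nil => simpa using hitems
  | cons kv rest ih =>
    have hkeys : d.keys = x.keys := by
      simp [PySem.Dict.keys, hitems, List.map_map, Function.comp_def, pvT]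
    have hndd : d.keys.Nodup := hkeys ▸ hnd
    simp only [List.foldl_cons]
    by_cases hc : kv.1 ∈ x.keys
    · -- key already grouped: A takes a running max in place, B appends to the group
      obtain ⟨ls, hmem⟩ : ∃ ls, (kv.1, ls) ∈ x.items := by simpa [PySem.Dict.keys] using hc
      have hlsne : ls ≠ [] := hne _ hmem
      have huniq : ∀ p ∈ x.items, p.1 = kv.1 → p = (kv.1, ls) := by
        intro p hp h1
        have e1 : x.get? kv.1 = some p.2 :=
          (PySem.Dict.get?_eq_some_iff_mem_items x kv.1 p.2 hnd).mpr (by rwa [← h1, Prod.mk.eta])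
        have e2 : x.get? kv.1 = some ls :=
          (PySem.Dict.get?_eq_some_iff_mem_items x kv.1 ls hnd).mpr hmem
        have : p.2 = ls := by rw [e1] at e2; exact Option.some.inj e2
        exact Prod.ext h1 this
      have hgx : x.getD kv.1 [] = ls := PySem.Dict.getD_of_mem_items x hmem hnd []
      have hTmem : (kv.1, max (PySem.Str.len kv.1) (pyMaxInt ls)) ∈ d.items := by
        rw [hitems]; exact List.mem_map_of_mem hmem
      have hgd : d.getD kv.1 0 = max (PySem.Str.len kv.1) (pyMaxInt ls) :=
        PySem.Dict.getD_of_mem_items d hTmem hndd 0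
      have hcx : x.contains kv.1 = true := (PySem.Dict.contains_iff_mem_keys x kv.1).mpr hc
      have hcd : d.contains kv.1 = true :=
        (PySem.Dict.contains_iff_mem_keys d kv.1).mpr (hkeys ▸ hc)
      have hB : pvStepB x kv = x.insert kv.1 (ls ++ [PySem.Str.len kv.2]) := by
        simp [pvStepB, PySem.Dict.modify, hgx]
      have hBitems : (pvStepB x kv).items =
          x.items.map (fun p => if p.1 == kv.1 then (kv.1, ls ++ [PySem.Str.len kv.2]) else p) := by
        rw [hB, PySem.Dict.items_insert_of_contains x _ hcx]
      refine ih (pvStepB x kv) (pvStepA d kv) ?_ ?_ ?_ ?_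
      · -- items relation after one step
        rw [hBitems, List.map_map]
        unfold pvStepA
        simp only [hgd]
        by_cases hgt : max (PySem.Str.len kv.1) (PySem.Str.len kv.2) >
            max (PySem.Str.len kv.1) (pyMaxInt ls)
        · rw [if_pos hgt, PySem.Dict.items_insert_of_contains d _ hcd, hitems, List.map_map]
          refine List.map_congr_left (fun p hp => ?_)
          by_cases h1 : p.1 = kv.1
          · obtain rfl := huniq p hp h1
            simp [pvT, pyMaxInt_append_singleton ls _ hlsne, PySem.Str.len_eq] at hgt ⊢
            omega
          · simp [pvT, h1]
        · rw [if_neg hgt, hitems]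
          refine List.map_congr_left (fun p hp => ?_)
          by_cases h1 : p.1 = kv.1
          · obtain rfl := huniq p hp h1
            simp [pvT, pyMaxInt_append_singleton ls _ hlsne, PySem.Str.len_eq] at hgt ⊢
            omega
          · simp [pvT, h1]
      · rw [hB]; exact PySem.Dict.nodup_keys_insert x _ _ hnd
      · intro p hp
        rw [hB] at hp
        rcases (PySem.Dict.mem_items_insert x _ _ p).mp hp with h | h
        · rw [h]; simp
        · exact hne p h.1
      · rcases hok with h | h
        · left; rw [hB, PySem.Dict.mem_keys_insert]; right; exact h
        · by_cases hk : kv.1 = ""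
          · left; rw [hB, PySem.Dict.mem_keys_insert]; left; exact hk.symm
          · right
            simpa [pvHeadOk, List.filter_cons, hk] using h
    · -- fresh key: both sides append it
      have hcx : x.contains kv.1 = false := by
        cases h : x.contains kv.1 with
        | false => rfl
        | true => exact absurd ((PySem.Dict.contains_iff_mem_keys x kv.1).mp h) hc
      have hcd : d.contains kv.1 = false := by
        cases h : d.contains kv.1 with
        | false => rfl
        | true => exact absurd ((PySem.Dict.contains_iff_mem_keys d kv.1).mp h) (hkeys ▸ hc)
      have hgd0 : d.getD kv.1 0 = 0 := PySem.Dict.getD_of_not_contains d 0 hcd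
      have hL : 0 < max (PySem.Str.len kv.1) (PySem.Str.len kv.2) := by
        by_cases hk : kv.1 = ""
        · rcases hok with h | h
          · exact absurd (hk ▸ h) hc
          · have hv : kv.2 ≠ "" := by
              by_contra hv
              simp [pvHeadOk, hk, hv] at h
            have := pvStrLen_pos kv.2 hv
            omega
        · have := pvStrLen_pos kv.1 hk
          omega
      have hB : pvStepB x kv = x.insert kv.1 [PySem.Str.len kv.2] := by
        simp [pvStepB, PySem.Dict.modify, PySem.Dict.getD_of_not_contains x [] hcx]
      refine ih (pvStepB x kv) (pvStepA d kv) ?_ ?_ ?_ ?_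
      · unfold pvStepA
        simp only [hgd0, if_pos hL]
        rw [PySem.Dict.items_insert_of_not_contains d _ hcd,
            hB, PySem.Dict.items_insert_of_not_contains x _ hcx,
            List.map_append, hitems]
        simp [pvT, pyMaxInt]
      · rw [hB]; exact PySem.Dict.nodup_keys_insert x _ _ hnd
      · intro p hp
        rw [hB] at hp
        rcases (PySem.Dict.mem_items_insert x _ _ p).mp hp with h | h
        · rw [h]; simp
        · exact hne p h.1
      · rcases hok with h | h
        · left; rw [hB, PySem.Dict.mem_keys_insert]; right; exact h
        · by_cases hk : kv.1 = ""
          · left; rw [hB, PySem.Dict.mem_keys_insert]; left; exact hk.symm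
          · right
            simpa [pvHeadOk, List.filter_cons, hk] using h

theorem len_title_spec : Claim_equal_len_title := by
  intro cl _ hpre
  unfold Spec_len_title
  show (cl.foldl (fun d l => l.foldl pvStepA d) PySem.Dict.empty).items =
    ((cl.foldl (fun x l => l.foldl pvStepB x) PySem.Dict.empty).items).map pvT
  rw [← List.foldl_flatten, ← List.foldl_flatten]
  exact pv_loop_eq cl.flatten PySem.Dict.empty PySem.Dict.empty
    (by simp [PySem.Dict.empty])
    PySem.Dict.nodup_keys_empty
    (by simp [PySem.Dict.empty])
    (Or.inr hpre)
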